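-- pv_equiv track=rewrite | github.com/mdshadanaltmash/Data-Structure-and-Algorithms | Array/smallest_window_to_be_sorted.py | find_smallest_window_optimized
-- ===== SOURCE A (Python) =====
-- def find_smallest_window_optimized(arr):
--     left = right = None
--     max_seen, min_seen = float("-inf"), float("inf")
--     n = len(arr)
--
--     for i in range(n):
--         max_seen = max(max_seen, arr[i])
--         if arr[i] < max_seen:
--             right = i
--
--     for i in range(n - 1, -1, -1):
--         min_seen = min(min_seen, arr[i])
--         if arr[i] > min_seen:
--             left = i
--
--     return left, right
-- ===== SOURCE B (Python) =====
-- def find_smallest_window_optimized(arr):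
--     s = sorted(arr)
--     left = right = None
--     for i, (a, b) in enumerate(zip(arr, s)):
--         if a != b:
--             if left is None:
--                 left = i
--             right = i
--     return left, right
-- ===== Notes on version B (the rewrite author's own statement) =====
-- stated objective: simpler
-- what changed: Replaces the two running-max/running-min index scans with sorting the array once and taking the first and last index where the array differs from its sorted copy.
import Mathlib
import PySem

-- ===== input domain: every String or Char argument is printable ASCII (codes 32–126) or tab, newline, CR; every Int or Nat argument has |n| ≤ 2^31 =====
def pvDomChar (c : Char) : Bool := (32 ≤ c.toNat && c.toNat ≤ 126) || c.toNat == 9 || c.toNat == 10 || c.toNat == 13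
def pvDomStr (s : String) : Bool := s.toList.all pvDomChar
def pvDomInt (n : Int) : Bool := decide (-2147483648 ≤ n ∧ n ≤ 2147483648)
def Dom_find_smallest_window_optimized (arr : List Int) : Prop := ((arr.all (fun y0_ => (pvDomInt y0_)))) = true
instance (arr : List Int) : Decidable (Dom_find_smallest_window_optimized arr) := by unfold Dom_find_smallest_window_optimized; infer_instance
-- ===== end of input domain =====

-- B replaces A's two running-max/running-min scans by sorting the array once and
-- returning the first and last index where the array differs from its sorted copy
-- (objective: simpler; same return value, no mutation).

-- ===== PORT A =====
-- float("-inf")/float("inf") seeds are modelled by an Option Int running extremum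
-- (none = not yet seen); Python's max(-inf, x) = x is the `none => a` branch.
def find_smallest_window_optimized (arr : List Int) : Option Int × Option Int :=
  let n : Int := PySem.List.len arr
  let st1 := (PySem.List.pyRange 0 n 1).foldl
    (fun (st : Option Int × Option Int) i =>
      let a := PySem.List.pyGetD arr i 0
      let m := match st.1 with | none => a | some mm => max mm a
      (some m, if a < m then some i else st.2))
    (none, none)
  let st2 := (PySem.List.pyRange (n-1) (-1) (-1)).foldl
    (fun (st : Option Int × Option Int) i =>
      let a := PySem.List.pyGetD arr i 0
      let m := match st.1 with | none => a | some mm => min mm a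
      (some m, if a > m then some i else st.2))
    (none, none)
  (st2.2, st1.2)

-- ===== PORT B =====
def find_smallest_window_optimized_alt (arr : List Int) : Option Int × Option Int :=
  let s := PySem.List.sorted arr (fun x => x) false
  (PySem.List.enumerate (arr.zip s) 0).foldl
    (fun (st : Option Int × Option Int) p =>
      if p.2.1 ≠ p.2.2 then
        ((if st.1 = none then some p.1 else st.1), some p.1)
      else st)
    (none, none)

-- ===== PRECONDITION & SPEC =====
def Spec_find_smallest_window_optimized (arr : List Int) (out : Option Int × Option Int) : Prop := out = find_smallest_window_optimized_alt arr
instance (arr : List Int) (out : Option Int × Option Int) : Decidable (Spec_find_smallest_window_optimized arr out) := by unfold Spec_find_smallest_window_optimized; infer_instance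

-- ===== CLAIM (what is proved, stated in full; the proofs are below) =====
def Claim_equal_find_smallest_window_optimized : Prop := ∀ (arr : List Int), Dom_find_smallest_window_optimized arr → Spec_find_smallest_window_optimized arr (find_smallest_window_optimized arr)

-- ===== LEMMAS AND PROOFS =====

-- sorted copy of arr (Python's sorted(arr))
def sArr (arr : List Int) : List Int := PySem.List.sorted arr (fun x => x) false

-- index i has a strictly larger element somewhere before it
def badR (arr : List Int) (i : Nat) : Bool := decide (∃ j < i, arr.getD i 0 < arr.getD j 0)
-- index i has a strictly smaller element somewhere after it
def badL (arr : List Int) (i : Nat) : Bool := decide (∃ j < arr.length, i < j ∧ arr.getD j 0 < arr.getD i 0)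
-- index i disagrees with the sorted copy
def misB (arr : List Int) (i : Nat) : Bool := decide (arr.getD i 0 ≠ (sArr arr).getD i 0)
-- mismatch predicate on a zipped list
def misZ (zs : List (Int × Int)) (i : Nat) : Bool := decide ((zs.getD i (0,0)).1 ≠ (zs.getD i (0,0)).2)

def firstIdx (p : Nat → Bool) (n : Nat) : Option Nat := (List.range n).find? p
def lastIdx (p : Nat → Bool) (n : Nat) : Option Nat := (List.range n).reverse.find? p

lemma firstIdx_none {p : Nat → Bool} {n : Nat} : firstIdx p n = none ↔ ∀ i < n, p i = false := by
  unfold firstIdx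
  rw [List.find?_eq_none]
  constructor
  · intro h i hi; simpa using h i (List.mem_range.mpr hi)
  · intro h x hx; simpa using h x (List.mem_range.mp hx)

lemma lastIdx_none {p : Nat → Bool} {n : Nat} : lastIdx p n = none ↔ ∀ i < n, p i = false := by
  unfold lastIdx
  rw [List.find?_eq_none]
  constructor
  · intro h i hi; simpa using h i (by simpa using List.mem_range.mpr hi)
  · intro h x hx; simpa using h x (List.mem_range.mp (by simpa using hx))

lemma firstIdx_some {p : Nat → Bool} {n a : Nat} : firstIdx p n = some a ↔ a < n ∧ p a = true ∧ ∀ i < a, p i = false := by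
  induction n generalizing a with
  | zero => simp [firstIdx]
  | succ n ih =>
    unfold firstIdx at *
    rw [List.range_succ, List.find?_append]
    cases h : (List.range n).find? p with
    | some b =>
      simp only [Option.some_or]
      rw [ih] at h
      constructor
      · intro heq
        injection heq with heq; subst heq
        exact ⟨by omega, h.2.1, h.2.2⟩
      · rintro ⟨ha, hpa, hmin⟩
        congr 1
        rcases Nat.lt_trichotomy a b with hab | hab | hab
        · exact absurd (h.2.2 a hab) (by simp [hpa])
        · omega
        · exact absurd (hmin b hab) (by simp [h.2.1])
    | none =>
      simp only [Option.none_or]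
      have hno : ∀ i < n, p i = false := by
        intro i hi
        have := List.find?_eq_none.mp h
        simpa using this i (List.mem_range.mpr hi)
      simp only [List.find?_cons, List.find?_nil]
      split
      · rename_i hpn
        constructor
        · rintro h'; cases h'; exact ⟨by omega, by assumption, fun i hi => hno i (by omega)⟩
        · rintro ⟨ha, hpa, hmin⟩
          have : a = n := by
            by_contra hne
            have : a < n := by omega
            exact absurd (hno a this) (by simp [hpa])
          simp [this]
      · rename_i hpn
        constructor
        · rintro ⟨⟩
        · rintro ⟨ha, hpa, hmin⟩
          have : a < n := by
            rcases Nat.lt_or_ge a n with h'|h'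
            · exact h'
            · have : a = n := by omega
              subst this; simp [hpa] at hpn
          exact absurd (hno a this) (by simp [hpa])

lemma lastIdx_some {p : Nat → Bool} {n a : Nat} : lastIdx p n = some a ↔ a < n ∧ p a = true ∧ ∀ i, a < i → i < n → p i = false := by
  induction n generalizing a with
  | zero => simp [lastIdx]
  | succ n ih =>
    unfold lastIdx at *
    rw [List.range_succ, List.reverse_append]
    simp only [List.reverse_singleton, List.singleton_append, List.find?_cons]
    split
    · rename_i hpn
      constructor
      · rintro h'; cases h'; exact ⟨by omega, hpn, fun i h1 h2 => by omega⟩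
      · rintro ⟨ha, hpa, hmax⟩
        have : a = n := by
          by_contra hne
          exact absurd (hmax n (by omega) (by omega)) (by simp [hpn])
        simp [this]
    · rename_i hpn
      rw [ih]
      constructor
      · rintro ⟨ha, hpa, hmax⟩
        refine ⟨by omega, hpa, fun i h1 h2 => ?_⟩
        rcases Nat.lt_or_ge i n with h'|h'
        · exact hmax i h1 h'
        · have : i = n := by omega
          subst this; simpa using hpn
      · rintro ⟨ha, hpa, hmax⟩
        have han : a ≠ n := by rintro rfl; simp [hpa] at hpn
        exact ⟨by omega, hpa, fun i h1 h2 => hmax i h1 (by omega)⟩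

lemma find?_congr' {p q : Nat → Bool} (l : List Nat) (h : ∀ x ∈ l, p x = q x) : l.find? p = l.find? q := by
  induction l with
  | nil => rfl
  | cons x t ih =>
    simp only [List.find?_cons, h x List.mem_cons_self]
    split
    · rfl
    · exact ih (fun y hy => h y (List.mem_cons_of_mem _ hy))

lemma firstIdx_congr {p q : Nat → Bool} {n : Nat} (h : ∀ i < n, p i = q i) : firstIdx p n = firstIdx q n := by
  exact find?_congr' _ (fun x hx => h x (List.mem_range.mp hx))

lemma lastIdx_congr {p q : Nat → Bool} {n : Nat} (h : ∀ i < n, p i = q i) : lastIdx p n = lastIdx q n := by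
  exact find?_congr' _ (fun x hx => h x (List.mem_range.mp (by simpa using hx)))

lemma lastIdx_eq_of_clean_iff {p q : Nat → Bool} {n : Nat}
    (H : ∀ k ≤ n, ((∀ i, k ≤ i → i < n → p i = false) ↔ (∀ i, k ≤ i → i < n → q i = false))) :
    lastIdx p n = lastIdx q n := by
  cases hp : lastIdx p n with
  | none =>
    cases hq : lastIdx q n with
    | none => rfl
    | some b =>
      exfalso
      have h1 := lastIdx_none.mp hp
      have h2 := (H 0 (by omega)).mp (fun i _ hi => h1 i hi)
      have h3 := lastIdx_some.mp hq
      exact absurd (h2 b (by omega) h3.1) (by simp [h3.2.1])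
  | some a =>
    have h3 := lastIdx_some.mp hp
    have hcq : ∀ i, a+1 ≤ i → i < n → q i = false :=
      (H (a+1) (by have := h3.1; omega)).mp (fun i h1 h2 => h3.2.2 i (by omega) h2)
    cases hq : lastIdx q n with
    | none =>
      exfalso
      have h1 := lastIdx_none.mp hq
      have h2 := (H 0 (by omega)).mpr (fun i _ hi => h1 i hi)
      exact absurd (h2 a (by omega) h3.1) (by simp [h3.2.1])
    | some b =>
      have h4 := lastIdx_some.mp hq
      have hcp : ∀ i, b+1 ≤ i → i < n → p i = false :=
        (H (b+1) (by have := h4.1; omega)).mpr (fun i h1 h2 => h4.2.2 i (by omega) h2)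
      congr 1
      rcases Nat.lt_trichotomy a b with hab|hab|hab
      · exact absurd (hcq b (by omega) h4.1) (by simp [h4.2.1])
      · omega
      · exact absurd (hcp a (by omega) h3.1) (by simp [h3.2.1])

lemma firstIdx_eq_of_clean_iff {p q : Nat → Bool} {n : Nat}
    (H : ∀ k ≤ n, ((∀ i, i < k → p i = false) ↔ (∀ i, i < k → q i = false))) :
    firstIdx p n = firstIdx q n := by
  cases hp : firstIdx p n with
  | none =>
    cases hq : firstIdx q n with
    | none => rfl
    | some b =>
      exfalso
      have h1 := firstIdx_none.mp hp
      have h2 := (H n (by omega)).mp h1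
      have h3 := firstIdx_some.mp hq
      exact absurd (h2 b h3.1) (by simp [h3.2.1])
  | some a =>
    have h3 := firstIdx_some.mp hp
    have hcq : ∀ i, i < a → q i = false := (H a (by have := h3.1; omega)).mp h3.2.2
    cases hq : firstIdx q n with
    | none =>
      exfalso
      have h1 := firstIdx_none.mp hq
      have h2 := (H n (by omega)).mpr h1
      exact absurd (h2 a h3.1) (by simp [h3.2.1])
    | some b =>
      have h4 := firstIdx_some.mp hq
      have hcp : ∀ i, i < b → p i = false := (H b (by have := h4.1; omega)).mpr h4.2.2
      congr 1
      rcases Nat.lt_trichotomy a b with hab|hab|hab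
      · exact absurd (hcp a hab) (by simp [h3.2.1])
      · omega
      · exact absurd (hcq b hab) (by simp [h4.2.1])

lemma sArr_perm (arr : List Int) : (sArr arr).Perm arr := PySem.List.sorted_perm arr _ _

lemma length_sArr (arr : List Int) : (sArr arr).length = arr.length := (sArr_perm arr).length_eq

lemma sArr_pairwise (arr : List Int) : (sArr arr).Pairwise (· ≤ ·) := by
  simpa using PySem.List.sorted_pairwise arr (fun x => x)

lemma sArr_mono (arr : List Int) {p q : Nat} (hpq : p ≤ q) (hq : q < (sArr arr).length) :
    (sArr arr)[p]'(by omega) ≤ (sArr arr)[q] := by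
  rcases eq_or_lt_of_le hpq with rfl|h
  · exact le_refl _
  · exact List.pairwise_iff_getElem.mp (sArr_pairwise arr) p q (by omega) hq h

-- badR i = false (i < n) iff every earlier element is ≤ arr[i]

lemma badR_false_iff (arr : List Int) (i : Nat) :
    badR arr i = false ↔ ∀ j < i, arr.getD j 0 ≤ arr.getD i 0 := by
  simp [badR]

lemma badL_false_iff (arr : List Int) (i : Nat) :
    badL arr i = false ↔ ∀ j < arr.length, i < j → arr.getD i 0 ≤ arr.getD j 0 := by
  simp [badL]

lemma suffix_clean_iff (arr : List Int) (k : Nat) (hk : k ≤ arr.length) :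
    (∀ i, k ≤ i → i < arr.length → badR arr i = false) ↔ arr.drop k = (sArr arr).drop k := by
  constructor
  · intro H
    -- s = sorted(take k arr) ++ drop k arr
    have hdom : ∀ i, k ≤ i → i < arr.length → ∀ j < i, arr.getD j 0 ≤ arr.getD i 0 :=
      fun i h1 h2 => (badR_false_iff arr i).mp (H i h1 h2)
    have hkey : sArr arr = sArr (arr.take k) ++ arr.drop k := by
      apply PySem.List.sorted_id_eq_of_perm_of_pairwise
      · calc (sArr (arr.take k) ++ arr.drop k).Perm (arr.take k ++ arr.drop k) :=
              (sArr_perm (arr.take k)).append (List.Perm.refl _)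
          _ = arr := by rw [List.take_append_drop]
      · rw [List.pairwise_append]
        refine ⟨sArr_pairwise _, ?_, ?_⟩
        · rw [List.pairwise_iff_getElem]
          intro p q hp hq hpq
          have hlen : (arr.drop k).length = arr.length - k := List.length_drop ..
          rw [List.getElem_drop, List.getElem_drop]
          have h1 : arr.getD (k+p) 0 ≤ arr.getD (k+q) 0 := by
            exact hdom (k+q) (by omega) (by omega) (k+p) (by omega)
          rwa [List.getD_eq_getElem arr 0 (by omega), List.getD_eq_getElem arr 0 (by omega)] at h1
        · intro x hx y hy
          have hx' : x ∈ arr.take k := ((sArr_perm (arr.take k)).mem_iff).mp hx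
          obtain ⟨j, hj, hxe⟩ := List.getElem_of_mem hx'
          rw [List.getElem_take] at hxe
          have hjk : j < k := by have := List.length_take_le k arr; have := hj; simp at hj; omega
          obtain ⟨p, hp, hye⟩ := List.getElem_of_mem hy
          rw [List.getElem_drop] at hye
          have hlen : (arr.drop k).length = arr.length - k := List.length_drop ..
          have h1 : arr.getD j 0 ≤ arr.getD (k+p) 0 :=
            hdom (k+p) (by omega) (by omega) j (by omega)
          rw [List.getD_eq_getElem arr 0 (by omega), List.getD_eq_getElem arr 0 (by omega)] at h1
          rw [← hxe, ← hye]
          exact h1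
    rw [hkey]
    have hlt : (sArr (arr.take k)).length = k := by
      rw [length_sArr, List.length_take]; omega
    rw [List.drop_left' hlt]
  · intro H i h1 h2
    rw [badR_false_iff]
    intro j hj
    have hsl := length_sArr arr
    -- arr[i] = s[i]
    have hi_eq : arr[i]'h2 = (sArr arr)[i]'(by omega) := by
      have h3 : (arr.drop k)[i-k]'(by rw [List.length_drop]; omega) = ((sArr arr).drop k)[i-k]'(by rw [List.length_drop, hsl]; omega) := by
        congr 1 <;> rw [H]
      rw [List.getElem_drop, List.getElem_drop] at h3
      have e1 : k + (i-k) = i := by omega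
      simp_rw [e1] at h3
      exact h3
    rw [List.getD_eq_getElem arr 0 (by omega), List.getD_eq_getElem arr 0 h2, hi_eq]
    rcases Nat.lt_or_ge j k with hjk|hjk
    · -- arr[j] ∈ take k arr ~ take k s
      have hperm : (arr.take k).Perm ((sArr arr).take k) := by
        have h4 : arr.take k ++ arr.drop k = arr := List.take_append_drop ..
        have h5 : (sArr arr).take k ++ (sArr arr).drop k = sArr arr := List.take_append_drop ..
        have h6 : (arr.take k ++ arr.drop k).Perm ((sArr arr).take k ++ (sArr arr).drop k) := by
          rw [h4, h5]; exact (sArr_perm arr).symm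
        rw [← H] at h6
        exact (List.perm_append_right_iff _).mp h6
      have hmem : arr[j]'(by omega) ∈ (sArr arr).take k := by
        apply hperm.mem_iff.mp
        have : (arr.take k)[j]'(by rw [List.length_take]; omega) = arr[j]'(by omega) := List.getElem_take ..
        rw [← this]; exact List.getElem_mem _
      obtain ⟨j', hj', hje⟩ := List.getElem_of_mem hmem
      rw [List.getElem_take] at hje
      have hj'k : j' < k := by rw [List.length_take] at hj'; omega
      rw [← hje]
      exact sArr_mono arr (by omega) (by omega)
    · -- arr[j] = s[j]
      have hj_eq : arr[j]'(by omega) = (sArr arr)[j]'(by omega) := by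
        have h3 : (arr.drop k)[j-k]'(by rw [List.length_drop]; omega) = ((sArr arr).drop k)[j-k]'(by rw [List.length_drop]; omega) := by
          congr 1 <;> rw [H]
        rw [List.getElem_drop, List.getElem_drop] at h3
        have e1 : k + (j-k) = j := by omega
        simp_rw [e1] at h3
        exact h3
      rw [hj_eq]
      exact sArr_mono arr (by omega) (by omega)

lemma prefix_clean_iff (arr : List Int) (k : Nat) (hk : k ≤ arr.length) :
    (∀ i, i < k → badL arr i = false) ↔ arr.take k = (sArr arr).take k := by
  constructor
  · intro H
    have hdom : ∀ i, i < k → ∀ j < arr.length, i < j → arr.getD i 0 ≤ arr.getD j 0 :=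
      fun i h1 => (badL_false_iff arr i).mp (H i h1)
    have hkey : sArr arr = arr.take k ++ sArr (arr.drop k) := by
      apply PySem.List.sorted_id_eq_of_perm_of_pairwise
      · calc (arr.take k ++ sArr (arr.drop k)).Perm (arr.take k ++ arr.drop k) :=
              (List.Perm.refl _).append (sArr_perm (arr.drop k))
          _ = arr := by rw [List.take_append_drop]
      · rw [List.pairwise_append]
        refine ⟨?_, sArr_pairwise _, ?_⟩
        · rw [List.pairwise_iff_getElem]
          intro p q hp hq hpq
          rw [List.length_take] at hp hq
          rw [List.getElem_take, List.getElem_take]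
          have h1 : arr.getD p 0 ≤ arr.getD q 0 :=
            hdom p (by omega) q (by omega) hpq
          rwa [List.getD_eq_getElem arr 0 (by omega), List.getD_eq_getElem arr 0 (by omega)] at h1
        · intro x hx y hy
          obtain ⟨j, hj, hxe⟩ := List.getElem_of_mem hx
          rw [List.length_take] at hj
          rw [List.getElem_take] at hxe
          have hy' : y ∈ arr.drop k := ((sArr_perm (arr.drop k)).mem_iff).mp hy
          obtain ⟨p, hp, hye⟩ := List.getElem_of_mem hy'
          rw [List.length_drop] at hp
          rw [List.getElem_drop] at hye
          have h1 : arr.getD j 0 ≤ arr.getD (k+p) 0 :=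
            hdom j (by omega) (k+p) (by omega) (by omega)
          rw [List.getD_eq_getElem arr 0 (by omega), List.getD_eq_getElem arr 0 (by omega)] at h1
          rw [← hxe, ← hye]
          exact h1
    rw [hkey]
    have hlt : (arr.take k).length = k := by rw [List.length_take]; omega
    rw [List.take_left' hlt]
  · intro H i h1
    rw [badL_false_iff]
    intro j hj hij
    have hsl := length_sArr arr
    have hi_eq : arr[i]'(by omega) = (sArr arr)[i]'(by omega) := by
      have h3 : (arr.take k)[i]'(by rw [List.length_take]; omega) = ((sArr arr).take k)[i]'(by rw [List.length_take]; omega) := by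
        congr 1 <;> rw [H]
      rwa [List.getElem_take, List.getElem_take] at h3
    rw [List.getD_eq_getElem arr 0 (by omega), List.getD_eq_getElem arr 0 (by omega), hi_eq]
    rcases Nat.lt_or_ge j k with hjk|hjk
    · have hj_eq : arr[j]'(by omega) = (sArr arr)[j]'(by omega) := by
        have h3 : (arr.take k)[j]'(by rw [List.length_take]; omega) = ((sArr arr).take k)[j]'(by rw [List.length_take]; omega) := by
          congr 1 <;> rw [H]
        rwa [List.getElem_take, List.getElem_take] at h3
      rw [hj_eq]
      exact sArr_mono arr (by omega) (by omega)
    · -- arr[j] ∈ drop k arr ~ drop k s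
      have hperm : (arr.drop k).Perm ((sArr arr).drop k) := by
        have h4 : arr.take k ++ arr.drop k = arr := List.take_append_drop ..
        have h5 : (sArr arr).take k ++ (sArr arr).drop k = sArr arr := List.take_append_drop ..
        have h6 : (arr.take k ++ arr.drop k).Perm ((sArr arr).take k ++ (sArr arr).drop k) := by
          rw [h4, h5]; exact (sArr_perm arr).symm
        rw [← H] at h6
        exact (List.perm_append_left_iff _).mp h6
      have hmem : arr[j]'(by omega) ∈ (sArr arr).drop k := by
        apply hperm.mem_iff.mp
        have h7 : (arr.drop k)[j-k]'(by rw [List.length_drop]; omega) = arr[j]'(by omega) := by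
          rw [List.getElem_drop]; congr 1; omega
        rw [← h7]; exact List.getElem_mem _
      obtain ⟨p, hp, hpe⟩ := List.getElem_of_mem hmem
      rw [List.length_drop] at hp
      rw [List.getElem_drop] at hpe
      rw [← hpe]
      exact sArr_mono arr (by omega) (by omega)

lemma drop_eq_iff_mis (arr : List Int) (k : Nat) (hk : k ≤ arr.length) :
    arr.drop k = (sArr arr).drop k ↔ (∀ i, k ≤ i → i < arr.length → misB arr i = false) := by
  have hsl := length_sArr arr
  constructor
  · intro H i h1 h2
    have e1 : k + (i - k) = i := by omega
    have h3 : arr[i]? = (sArr arr)[i]? := by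
      have h4 := congrArg (fun l => l[i-k]?) H
      simp only [List.getElem?_drop] at h4
      rwa [e1] at h4
    simp [misB, List.getD, h3]
  · intro H
    apply List.ext_getElem?
    intro p
    simp only [List.getElem?_drop]
    rcases Nat.lt_or_ge (k+p) arr.length with h|h
    · have h3 := H (k+p) (by omega) h
      simp [misB, List.getD] at h3
      rw [List.getElem?_eq_getElem h, List.getElem?_eq_getElem (show k+p < (sArr arr).length by omega)] at h3 ⊢
      simpa using h3
    · rw [List.getElem?_eq_none (by omega), List.getElem?_eq_none (by omega)]

lemma take_eq_iff_mis (arr : List Int) (k : Nat) (hk : k ≤ arr.length) :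
    arr.take k = (sArr arr).take k ↔ (∀ i, i < k → misB arr i = false) := by
  have hsl := length_sArr arr
  constructor
  · intro H i h1
    have h3 : arr[i]? = (sArr arr)[i]? := by
      have h4 := congrArg (fun l => l[i]?) H
      simp only [List.getElem?_take] at h4
      simpa [h1] using h4
    simp [misB, List.getD, h3]
  · intro H
    apply List.ext_getElem?
    intro p
    simp only [List.getElem?_take]
    split
    · rename_i hp
      rcases Nat.lt_or_ge p arr.length with h|h
      · have h3 := H p hp
        simp [misB, List.getD] at h3
        rw [List.getElem?_eq_getElem h, List.getElem?_eq_getElem (show p < (sArr arr).length by omega)] at h3 ⊢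
        simpa using h3
      · rw [List.getElem?_eq_none (by omega), List.getElem?_eq_none (by omega)]
    · rfl










-- ===== the order-theoretic core =====






lemma lastIdx_badR_eq_mis (arr : List Int) : lastIdx (badR arr) arr.length = lastIdx (misB arr) arr.length := by
  apply lastIdx_eq_of_clean_iff
  intro k hk
  rw [suffix_clean_iff arr k hk, drop_eq_iff_mis arr k hk]

lemma firstIdx_badL_eq_mis (arr : List Int) : firstIdx (badL arr) arr.length = firstIdx (misB arr) arr.length := by
  apply firstIdx_eq_of_clean_iff
  intro k hk
  rw [prefix_clean_iff arr k hk, take_eq_iff_mis arr k hk]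

-- ===== small helpers about max?/min?/getD =====

lemma max?_append_singleton (ys : List Int) (x : Int) :
    (ys ++ [x]).max? = some (match ys.max? with | none => x | some m => max m x) := by
  cases h : ys.max? with
  | none =>
    have : ys = [] := List.max?_eq_none_iff.mp h
    subst this; rfl
  | some m =>
    rcases List.max?_eq_some_iff.mp h with ⟨hm, hub⟩
    apply List.max?_eq_some_iff.mpr
    constructor
    · rcases max_cases m x with ⟨he,_⟩|⟨he,_⟩ <;> simp [he, hm]
    · intro b hb
      rcases List.mem_append.mp hb with hb|hb
      · exact le_trans (hub b hb) (le_max_left m x)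
      · have hbx : b = x := by simpa using hb
        rw [hbx]; exact le_max_right m x

lemma min?_cons' (y : Int) (t : List Int) :
    (y :: t).min? = some (match t.min? with | none => y | some m => min m y) := by
  cases h : t.min? with
  | none =>
    have : t = [] := List.min?_eq_none_iff.mp h
    subst this; rfl
  | some m =>
    rcases List.min?_eq_some_iff.mp h with ⟨hm, hlb⟩
    apply List.min?_eq_some_iff.mpr
    constructor
    · rcases min_cases m y with ⟨he,_⟩|⟨he,_⟩ <;> simp [he, hm]
    · intro b hb
      rcases List.mem_cons.mp hb with hb|hb
      · have hby : b = y := by simpa using hb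
        rw [hby]; exact min_le_right m y
      · exact le_trans (min_le_left m y) (hlb b hb)

lemma exists_getD_gt_iff (ys : List Int) (x : Int) :
    (∃ j < ys.length, x < ys.getD j 0) ↔ (∃ m, ys.max? = some m ∧ x < m) := by
  constructor
  · rintro ⟨j, hj, hlt⟩
    cases h : ys.max? with
    | none =>
      have : ys = [] := List.max?_eq_none_iff.mp h
      subst this; simp at hj
    | some m =>
      rcases List.max?_eq_some_iff.mp h with ⟨_, hub⟩
      refine ⟨m, rfl, lt_of_lt_of_le hlt (hub _ ?_)⟩
      rw [List.getD_eq_getElem ys 0 hj]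
      exact List.getElem_mem hj
  · rintro ⟨m, h, hxm⟩
    rcases List.max?_eq_some_iff.mp h with ⟨hm, _⟩
    obtain ⟨j, hj, hje⟩ := List.getElem_of_mem hm
    exact ⟨j, hj, by rw [List.getD_eq_getElem ys 0 hj, hje]; exact hxm⟩

lemma exists_getD_lt_iff (ts : List Int) (y : Int) :
    (∃ j < ts.length, ts.getD j 0 < y) ↔ (∃ m, ts.min? = some m ∧ m < y) := by
  constructor
  · rintro ⟨j, hj, hlt⟩
    cases h : ts.min? with
    | none =>
      have : ts = [] := List.min?_eq_none_iff.mp h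
      subst this; simp at hj
    | some m =>
      rcases List.min?_eq_some_iff.mp h with ⟨_, hlb⟩
      refine ⟨m, rfl, lt_of_le_of_lt (hlb _ ?_) hlt⟩
      rw [List.getD_eq_getElem ts 0 hj]
      exact List.getElem_mem hj
  · rintro ⟨m, h, hmy⟩
    rcases List.min?_eq_some_iff.mp h with ⟨hm, _⟩
    obtain ⟨j, hj, hje⟩ := List.getElem_of_mem hm
    exact ⟨j, hj, by rw [List.getD_eq_getElem ts 0 hj, hje]; exact hmy⟩

lemma getD_append_left {α : Type} (l₁ l₂ : List α) (i : Nat) (d : α) (h : i < l₁.length) :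
    (l₁ ++ l₂).getD i d = l₁.getD i d := by
  simp [List.getD, List.getElem?_append_left h]

lemma getD_append_length {α : Type} (l₁ : List α) (x : α) (d : α) :
    (l₁ ++ [x]).getD l₁.length d = x := by
  simp [List.getD]

-- ===== badR/badL/misZ under list surgery =====

lemma badR_append (ys : List Int) (x : Int) (i : Nat) (h : i < ys.length) :
    badR (ys ++ [x]) i = badR ys i := by
  simp only [badR]
  rw [decide_eq_decide]
  constructor
  · rintro ⟨j, hj, hlt⟩
    exact ⟨j, hj, by rwa [getD_append_left ys [x] i 0 h, getD_append_left ys [x] j 0 (by omega)] at hlt⟩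
  · rintro ⟨j, hj, hlt⟩
    exact ⟨j, hj, by rw [getD_append_left ys [x] i 0 h, getD_append_left ys [x] j 0 (by omega)]; exact hlt⟩

lemma badR_append_last (ys : List Int) (x : Int) :
    badR (ys ++ [x]) ys.length = decide (∃ m, ys.max? = some m ∧ x < m) := by
  simp only [badR]
  rw [decide_eq_decide, ← exists_getD_gt_iff]
  constructor
  · rintro ⟨j, hj, hlt⟩
    exact ⟨j, hj, by rwa [getD_append_length ys x 0, getD_append_left ys [x] j 0 hj] at hlt⟩
  · rintro ⟨j, hj, hlt⟩
    exact ⟨j, hj, by rw [getD_append_length ys x 0, getD_append_left ys [x] j 0 hj]; exact hlt⟩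

lemma badL_cons_succ (y : Int) (t : List Int) (i : Nat) :
    badL (y :: t) (i + 1) = badL t i := by
  simp only [badL]
  rw [decide_eq_decide]
  constructor
  · rintro ⟨j, hj, hij, hlt⟩
    cases j with
    | zero => omega
    | succ j' =>
      refine ⟨j', by simpa using hj, by omega, ?_⟩
      rwa [List.getD_cons_succ, List.getD_cons_succ] at hlt
  · rintro ⟨j, hj, hij, hlt⟩
    refine ⟨j + 1, by simpa using hj, by omega, ?_⟩
    rwa [List.getD_cons_succ, List.getD_cons_succ]

lemma badL_cons_zero (y : Int) (t : List Int) :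
    badL (y :: t) 0 = decide (∃ m, t.min? = some m ∧ m < y) := by
  simp only [badL]
  rw [decide_eq_decide, ← exists_getD_lt_iff]
  constructor
  · rintro ⟨j, hj, hij, hlt⟩
    cases j with
    | zero => omega
    | succ j' =>
      refine ⟨j', by simpa using hj, ?_⟩
      rwa [List.getD_cons_succ] at hlt
  · rintro ⟨j, hj, hlt⟩
    refine ⟨j + 1, by simpa using hj, by omega, ?_⟩
    rwa [List.getD_cons_succ]

lemma misZ_append (zs : List (Int × Int)) (p : Int × Int) (i : Nat) (h : i < zs.length) :
    misZ (zs ++ [p]) i = misZ zs i := by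
  simp only [misZ, getD_append_left _ _ _ _ h]

lemma misZ_append_last (zs : List (Int × Int)) (p : Int × Int) :
    misZ (zs ++ [p]) zs.length = decide (p.1 ≠ p.2) := by
  simp only [misZ, getD_append_length]

-- ===== firstIdx/lastIdx recursions =====

lemma lastIdx_succ (p : Nat → Bool) (n : Nat) :
    lastIdx p (n + 1) = if p n then some n else lastIdx p n := by
  unfold lastIdx
  rw [List.range_succ, List.reverse_append]
  cases h : p n <;> simp [h]

lemma firstIdx_succ (p : Nat → Bool) (n : Nat) :
    firstIdx p (n + 1) = (firstIdx p n).or (if p n then some n else none) := by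
  unfold firstIdx
  rw [List.range_succ, List.find?_append]
  congr 1
  cases h : p n <;> simp [h]

lemma find?_map_succ {p : Nat → Bool} (l : List Nat) :
    (l.map Nat.succ).find? p = (l.find? (fun i => p (i + 1))).map Nat.succ := by
  induction l with
  | nil => rfl
  | cons x t ih =>
    simp only [List.map_cons, List.find?_cons, Nat.succ_eq_add_one]
    cases h : p (x + 1) <;> simp [h, ih]

lemma firstIdx_shift (p : Nat → Bool) (n : Nat) :
    firstIdx p (n + 1) = if p 0 then some 0 else (firstIdx (fun i => p (i + 1)) n).map (· + 1) := by
  unfold firstIdx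
  rw [List.range_succ_eq_map, List.find?_cons]
  cases h : p 0 with
  | true => simp [h]
  | false =>
    simp only [h]
    rw [find?_map_succ]
    cases List.find? (fun i => p (i + 1)) (List.range n) <;> rfl

-- ===== fold characterisations =====

lemma foldR_char (ys : List Int) :
    (PySem.List.pyRange 0 (PySem.List.len ys) 1).foldl
      (fun (st : Option Int × Option Int) i =>
        let a := PySem.List.pyGetD ys i 0
        let m := match st.1 with | none => a | some mm => max mm a
        (some m, if a < m then some i else st.2))
      (none, none)
    = (ys.max?, (lastIdx (badR ys) ys.length).map (fun k => (k : Int))) := by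
  induction ys using List.reverseRecOn with
  | nil => simp [lastIdx, PySem.List.pyRange_one_eq_nil, PySem.List.len]
  | append_singleton ys x ih =>
    rw [PySem.List.len_eq] at *
    have hlen : ((ys ++ [x]).length : Int) = (ys.length : Int) + 1 := by simp
    rw [hlen, PySem.List.pyRange_one_succ_right (by positivity), List.foldl_append]
    have hcongr : (PySem.List.pyRange 0 (ys.length : Int) 1).foldl
        (fun (st : Option Int × Option Int) i =>
          let a := PySem.List.pyGetD (ys ++ [x]) i 0
          let m := match st.1 with | none => a | some mm => max mm a
          (some m, if a < m then some i else st.2))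
        (none, none)
      = (PySem.List.pyRange 0 (ys.length : Int) 1).foldl
        (fun (st : Option Int × Option Int) i =>
          let a := PySem.List.pyGetD ys i 0
          let m := match st.1 with | none => a | some mm => max mm a
          (some m, if a < m then some i else st.2))
        (none, none) := by
      apply PySem.List.foldl_congr_mem
      intro acc j hj
      rcases PySem.List.mem_pyRange_one.mp hj with ⟨h0, hlt⟩
      have hj' : j = ((j.toNat : Nat) : Int) := by omega
      have hjn : j.toNat < ys.length := by omega
      rw [hj', PySem.List.pyGetD_natCast, PySem.List.pyGetD_natCast,
        getD_append_left _ _ _ _ hjn]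
    rw [hcongr, ih]
    simp only [List.foldl_cons, List.foldl_nil]
    rw [List.length_append, List.length_singleton, lastIdx_succ,
      lastIdx_congr (fun i hi => badR_append ys x i hi), badR_append_last,
      max?_append_singleton]
    have hx : PySem.List.pyGetD (ys ++ [x]) (ys.length : Int) 0 = x := by
      rw [PySem.List.pyGetD_natCast]
      exact getD_append_length ys x 0
    simp only [hx]
    cases h : ys.max? with
    | none => simp
    | some mm =>
      by_cases hxm : x < mm
      · have : max mm x = mm := max_eq_left (le_of_lt hxm)
        simp [this, hxm, h]
      · have : max mm x = x := max_eq_right (by omega)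
        simp [this, hxm, h]

lemma foldL_char (t : List Int) (big : List Int) (a : Int)
    (hview : ∀ j : Nat, j < t.length → PySem.List.pyGetD big (a + j) 0 = t.getD j 0) :
    ((PySem.List.pyRange a (a + t.length) 1).reverse).foldl
      (fun (st : Option Int × Option Int) i =>
        let x := PySem.List.pyGetD big i 0
        let m := match st.1 with | none => x | some mm => min mm x
        (some m, if x > m then some i else st.2))
      (none, none)
    = (t.min?, (firstIdx (badL t) t.length).map (fun k => a + (k : Int))) := by
  induction t generalizing a with
  | nil => simp [firstIdx, PySem.List.pyRange_one_eq_nil]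
  | cons y s ih =>
    have hlen : (a + ((y :: s).length : Int)) = (a + 1) + (s.length : Int) := by
      simp; omega
    rw [hlen, PySem.List.pyRange_one_cons (by have := Int.natCast_nonneg s.length; omega),
      List.reverse_cons, List.foldl_append]
    have ihs := ih (a + 1) (fun j hj => by
      have := hview (j + 1) (by simpa using Nat.succ_lt_succ hj)
      rwa [show a + ((j : Nat) + 1 : Nat) = a + 1 + j by push_cast; ring, List.getD_cons_succ] at this)
    rw [ihs]
    simp only [List.foldl_cons, List.foldl_nil]
    have hy : PySem.List.pyGetD big a 0 = y := by
      have := hview 0 (by simp)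
      simpa using this
    simp only [hy]
    rw [List.length_cons, firstIdx_shift,
      show (fun i => badL (y :: s) (i + 1)) = badL s from funext (badL_cons_succ y s),
      badL_cons_zero, min?_cons']
    cases h : s.min? with
    | none =>
      have hs : s = [] := List.min?_eq_none_iff.mp h
      subst hs
      simp [firstIdx]
    | some mm =>
      by_cases hmy : mm < y
      · have : min mm y = mm := min_eq_left (le_of_lt hmy)
        simp only [h, this, hmy]
        simp [gt_iff_lt, hmy]
      · have : min mm y = y := min_eq_right (by omega)
        simp only [h, this, hmy]
        have hyy : ¬ (y < y) := lt_irrefl y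
        simp [gt_iff_lt, hmy]
        cases hfi : firstIdx (badL s) s.length with
        | none => simp
        | some k => simp; ring

lemma foldB_char (zs : List (Int × Int)) :
    (PySem.List.enumerate zs 0).foldl
      (fun (st : Option Int × Option Int) p =>
        if p.2.1 ≠ p.2.2 then
          ((if st.1 = none then some p.1 else st.1), some p.1)
        else st)
      (none, none)
    = ((firstIdx (misZ zs) zs.length).map (fun k => (k : Int)),
       (lastIdx (misZ zs) zs.length).map (fun k => (k : Int))) := by
  induction zs using List.reverseRecOn with
  | nil => simp [firstIdx, lastIdx, PySem.List.enumerate]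
  | append_singleton zs p ih =>
    rw [PySem.List.enumerate_append, List.foldl_append]
    have h1 : PySem.List.enumerate [p] (0 + (zs.length : Int)) = [((zs.length : Int), p)] := by
      simp [PySem.List.enumerate]
    rw [h1, ih]
    simp only [List.foldl_cons, List.foldl_nil]
    rw [List.length_append, List.length_singleton, lastIdx_succ, firstIdx_succ,
      lastIdx_congr (fun i hi => misZ_append zs p i hi),
      firstIdx_congr (fun i hi => misZ_append zs p i hi),
      misZ_append_last]
    by_cases hne : p.1 = p.2
    · simp [hne]
    · simp only [hne, decide_eq_true_eq, ne_eq, not_false_iff, if_pos]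
      cases hfi : firstIdx (misZ zs) zs.length <;> simp

lemma misZ_zip_eq (arr : List Int) : ∀ i < (arr.zip (sArr arr)).length, misZ (arr.zip (sArr arr)) i = misB arr i := by
  intro i hi
  have hsl := length_sArr arr
  rw [List.length_zip, hsl, min_self] at hi
  simp only [misZ, misB]
  rw [List.getD_eq_getElem _ _ (by rw [List.length_zip, hsl, min_self]; omega),
    List.getD_eq_getElem arr 0 hi, List.getD_eq_getElem (sArr arr) 0 (by omega),
    List.getElem_zip]

-- ===== assembly =====

lemma portA_eq (arr : List Int) :
    find_smallest_window_optimized arr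
    = ((firstIdx (badL arr) arr.length).map (fun k => (k : Int)),
       (lastIdx (badR arr) arr.length).map (fun k => (k : Int))) := by
  simp only [find_smallest_window_optimized]
  have hrev : PySem.List.pyRange (PySem.List.len arr - 1) (-1) (-1)
      = (PySem.List.pyRange 0 (PySem.List.len arr) 1).reverse := by
    rw [PySem.List.pyRange_neg_one_eq_reverse]
    norm_num
  rw [hrev]
  have h0 : PySem.List.pyRange 0 (PySem.List.len arr) 1
      = PySem.List.pyRange 0 (0 + (arr.length : Int)) 1 := by
    rw [PySem.List.len_eq]; norm_num
  rw [foldR_char]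
  rw [h0, foldL_char arr arr 0 (fun j hj => by
    rw [zero_add, PySem.List.pyGetD_natCast])]
  simp

lemma portB_eq (arr : List Int) :
    find_smallest_window_optimized_alt arr
    = ((firstIdx (misB arr) arr.length).map (fun k => (k : Int)),
       (lastIdx (misB arr) arr.length).map (fun k => (k : Int))) := by
  simp only [find_smallest_window_optimized_alt]
  rw [foldB_char]
  have hzl : (arr.zip (sArr arr)).length = arr.length := by
    rw [List.length_zip, length_sArr, min_self]
  have hs : (PySem.List.sorted arr (fun x => x) false) = sArr arr := rfl
  rw [hs, firstIdx_congr (misZ_zip_eq arr), lastIdx_congr (misZ_zip_eq arr), hzl]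

-- ===== VERDICT (by name: the statement is the Claim_ definition above) =====
theorem find_smallest_window_optimized_spec : Claim_equal_find_smallest_window_optimized := by
  intro arr _
  unfold Spec_find_smallest_window_optimized
  rw [portA_eq, portB_eq, lastIdx_badR_eq_mis, firstIdx_badL_eq_mis]
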